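-- pv_equiv track=rewrite | github.com/ICPRplshelp/MS-Word-Pandoc-Filters | helper_files/helpers.py | remove_consecutive_empty_entries
-- ===== SOURCE A (Python) =====
-- def remove_consecutive_empty_entries(lst: list[str]) -> list[str]:
--     """If more than one empty entry occurs in a row, remove them.
--     """
--     new_list = []
--     last_empty = False
--     for item in lst:
--         if item != '':
--             new_list.append(item)
--             last_empty = False
--         elif not last_empty:
--             new_list.append(item)
--             last_empty = True
--         else:
--             pass  # do nothing
--     return new_list
-- ===== SOURCE B (Python) =====
-- from itertools import groupby
--
--
-- def remove_consecutive_empty_entries(lst: list[str]) -> list[str]: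
--     new_list = []
--     for is_empty, group in groupby(lst, key=lambda x: x == ''):
--         if is_empty:
--             new_list.append('')
--         else:
--             new_list.extend(group)
--     return new_list
-- ===== Notes on version B (the rewrite author's own statement) =====
-- stated objective: idiomatic
-- what changed: Replaces the per-item last_empty flag loop with an itertools.groupby traversal over maximal runs of equal emptiness, emitting one '' per empty run and extending with non-empty runs.
import Mathlib
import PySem

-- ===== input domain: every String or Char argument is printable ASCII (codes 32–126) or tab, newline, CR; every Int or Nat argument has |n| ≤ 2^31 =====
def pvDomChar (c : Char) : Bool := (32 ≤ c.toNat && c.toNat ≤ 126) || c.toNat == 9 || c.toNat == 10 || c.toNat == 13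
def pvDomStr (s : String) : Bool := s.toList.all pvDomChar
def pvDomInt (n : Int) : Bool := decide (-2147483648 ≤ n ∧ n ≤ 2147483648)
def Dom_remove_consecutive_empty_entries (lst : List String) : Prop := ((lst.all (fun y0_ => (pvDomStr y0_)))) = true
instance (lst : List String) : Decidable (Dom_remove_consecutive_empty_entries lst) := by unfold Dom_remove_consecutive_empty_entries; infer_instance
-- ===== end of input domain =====

-- B replaces A's per-item last_empty flag loop with a run-grouping traversal (itertools.groupby): one "" per maximal empty run, non-empty runs copied through; objective: idiomatic, same cost.


-- ===== PORT A =====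
def remove_consecutive_empty_entries (lst : List String) : List String :=
  (lst.foldl (fun (st : List String × Bool) item =>
    if item ≠ "" then (st.1 ++ [item], false)
    else if !st.2 then (st.1 ++ [item], true)
    else st) ([], false)).1

-- ===== PORT B =====
-- run-based traversal: one "" per maximal empty run, non-empty runs copied through
def remove_consecutive_empty_entries_alt (lst : List String) : List String :=
  match lst with
  | [] => []
  | x :: xs =>
    if x = "" then "" :: remove_consecutive_empty_entries_alt (xs.dropWhile (· = ""))
    else x :: remove_consecutive_empty_entries_alt xs
termination_by lst.length
decreasing_by
  · exact Nat.lt_succ_of_le (List.length_dropWhile_le _ _)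
  · exact Nat.lt_succ_self _

-- ===== PRECONDITION & SPEC =====
def Spec_remove_consecutive_empty_entries (lst : List String) (out : List String) : Prop := out = remove_consecutive_empty_entries_alt lst
instance (lst : List String) (out : List String) : Decidable (Spec_remove_consecutive_empty_entries lst out) := by unfold Spec_remove_consecutive_empty_entries; infer_instance

-- ===== CLAIM (what is proved, stated in full; the proofs are below) =====
def Claim_equal_remove_consecutive_empty_entries : Prop := ∀ (lst : List String), Dom_remove_consecutive_empty_entries lst → Spec_remove_consecutive_empty_entries lst (remove_consecutive_empty_entries lst)

-- ===== LEMMAS AND PROOFS =====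

-- alt skips leading empties when entered in "just saw an empty" mode
theorem pv_alt_empty_cons (xs : List String) :
    remove_consecutive_empty_entries_alt ("" :: xs)
      = "" :: remove_consecutive_empty_entries_alt (xs.dropWhile (· = "")) := by
  rw [remove_consecutive_empty_entries_alt]; simp

theorem pv_alt_cons_ne (x : String) (xs : List String) (hx : ¬ x = "") :
    remove_consecutive_empty_entries_alt (x :: xs) = x :: remove_consecutive_empty_entries_alt xs := by
  rw [remove_consecutive_empty_entries_alt.eq_def]; simp [hx]

-- loop invariant: the foldl state unfolds to acc ++ alt-of-the-rest (in the right mode)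
theorem pv_loop (lst : List String) (acc : List String) (flag : Bool) :
    (lst.foldl (fun (st : List String × Bool) item =>
      if item ≠ "" then (st.1 ++ [item], false)
      else if !st.2 then (st.1 ++ [item], true)
      else st) (acc, flag)).1
    = acc ++ (if flag then remove_consecutive_empty_entries_alt (lst.dropWhile (· = ""))
              else remove_consecutive_empty_entries_alt lst) := by
  induction lst generalizing acc flag with
  | nil => cases flag <;> simp [remove_consecutive_empty_entries_alt, List.dropWhile]
  | cons x xs ih =>
    by_cases hx : x = ""
    · subst hx
      cases flag with
      | false =>
        simp only [List.foldl_cons, ne_eq, not_true_eq_false, if_false, Bool.not_false, if_true]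
        rw [ih, pv_alt_empty_cons]
        simp
      | true =>
        simp only [List.foldl_cons, ne_eq, not_true_eq_false, if_false, Bool.not_true]
        rw [ih]
        simp [List.dropWhile]
    · cases flag with
      | false =>
        simp only [List.foldl_cons, ne_eq, hx, not_false_eq_true, if_true]
        rw [ih, pv_alt_cons_ne x xs hx]
        simp
      | true =>
        simp only [List.foldl_cons, ne_eq, hx, not_false_eq_true, if_true]
        rw [ih]
        simp [List.dropWhile_cons, hx, pv_alt_cons_ne x xs hx]

-- ===== VERDICT (by name: the statement is the Claim_ definition above) =====
theorem remove_consecutive_empty_entries_spec : Claim_equal_remove_consecutive_empty_entries := by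
  intro lst _
  unfold Spec_remove_consecutive_empty_entries remove_consecutive_empty_entries
  rw [pv_loop lst [] false]
  simp
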